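-- pv_equiv track=rewrite | github.com/TumuGuskun/aoc | aoc-2015/day17/Day17.py | use_or_lose
-- ===== SOURCE A (Python) =====
-- def use_or_lose(sizes, capacity):
--     if capacity == 0:
--         return 1
--     elif not sizes:
--         return 0
--     elif sizes[0] > capacity:
--         return use_or_lose(sizes[1:], capacity)
--     else:
--         return use_or_lose(sizes[1:], capacity - sizes[0]) + use_or_lose(sizes[1:], capacity)
-- ===== SOURCE B (Python) =====
-- def use_or_lose(sizes, capacity):
--     if capacity == 0:
--         return 1
--     total = 0
--     active = {capacity: 1}
--     for s in sizes:
--         new = {}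
--         for c, k in active.items():
--             new[c] = new.get(c, 0) + k
--             if s <= c:
--                 r = c - s
--                 if r == 0:
--                     total += k
--                 else:
--                     new[r] = new.get(r, 0) + k
--         active = new
--     return total
-- ===== Notes on version B (the rewrite author's own statement) =====
-- stated objective: faster
-- what changed: Replaced A's exponential take/skip branching recursion by an iterative level DP that keeps a dict mapping each distinct residual capacity to the number of branches reaching it, merging equal residuals at every step.
import Mathlib
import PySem

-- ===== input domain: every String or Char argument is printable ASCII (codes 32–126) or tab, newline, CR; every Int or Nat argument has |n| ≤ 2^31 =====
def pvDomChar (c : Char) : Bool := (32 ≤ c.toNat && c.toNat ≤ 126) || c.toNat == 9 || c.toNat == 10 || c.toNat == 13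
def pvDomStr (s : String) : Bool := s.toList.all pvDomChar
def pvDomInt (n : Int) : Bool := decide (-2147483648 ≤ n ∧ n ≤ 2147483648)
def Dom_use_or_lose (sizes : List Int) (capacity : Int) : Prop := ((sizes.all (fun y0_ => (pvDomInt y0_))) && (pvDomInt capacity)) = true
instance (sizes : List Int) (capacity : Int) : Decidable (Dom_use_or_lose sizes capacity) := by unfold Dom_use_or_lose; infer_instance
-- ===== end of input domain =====

-- B replaces A's branching recursion by an iterative level DP over a dict of residual
-- capacities, merging branches that reach the same residual (objective: faster).

-- ===== PORT A =====
def use_or_lose (sizes : List Int) (capacity : Int) : Int :=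
  if capacity = 0 then 1
  else
    match sizes with
    | [] => 0
    | s :: rest =>
      if s > capacity then use_or_lose rest capacity
      else use_or_lose rest (capacity - s) + use_or_lose rest capacity

-- ===== PORT B =====
-- one item of Source B's outer loop: the inner 'for c, k in active.items()' builds (total, new)
def uolStep (s : Int) (st : Int × PySem.Dict Int Int) : Int × PySem.Dict Int Int :=
  st.2.items.foldl
    (fun acc p =>
      let c := p.1
      let k := p.2
      let new1 := acc.2.insert c (acc.2.getD c 0 + k)
      if s ≤ c then
        if c - s = 0 then (acc.1 + k, new1)
        else (acc.1, new1.insert (c - s) (new1.getD (c - s) 0 + k))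
      else (acc.1, new1))
    (st.1, PySem.Dict.empty)

def use_or_lose_alt (sizes : List Int) (capacity : Int) : Int :=
  if capacity = 0 then 1
  else (sizes.foldl (fun st s => uolStep s st) (0, PySem.Dict.ofList [(capacity, 1)])).1

-- ===== PRECONDITION & SPEC =====
def Spec_use_or_lose (sizes : List Int) (capacity : Int) (out : Int) : Prop := out = use_or_lose_alt sizes capacity
instance (sizes : List Int) (capacity : Int) (out : Int) : Decidable (Spec_use_or_lose sizes capacity out) := by unfold Spec_use_or_lose; infer_instance

-- ===== CLAIM (what is proved, stated in full; the proofs are below) =====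
def Claim_equal_use_or_lose : Prop := ∀ (sizes : List Int) (capacity : Int), Dom_use_or_lose sizes capacity → Spec_use_or_lose sizes capacity (use_or_lose sizes capacity)

-- ===== LEMMAS AND PROOFS =====

-- weighted sum of A's values over a dict's entries
def Wsum (sizes : List Int) (d : PySem.Dict Int Int) : Int :=
  (d.items.map (fun p => p.2 * use_or_lose sizes p.1)).sum

theorem use_or_lose_zero (sizes : List Int) : use_or_lose sizes 0 = 1 := by
  cases sizes <;> simp [use_or_lose]

theorem use_or_lose_nil (c : Int) (hc : c ≠ 0) : use_or_lose [] c = 0 := by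
  simp [use_or_lose, hc]

theorem use_or_lose_cons (s c : Int) (rest : List Int) (hc : c ≠ 0) :
    use_or_lose (s :: rest) c =
      if s > c then use_or_lose rest c
      else use_or_lose rest (c - s) + use_or_lose rest c := by
  simp [use_or_lose, hc]

-- replacing the (unique) entry at key c by adding k changes the weighted sum by k * g c
theorem sum_map_replace (l : List (Int × Int)) (hnd : (l.map Prod.fst).Nodup)
    (c k : Int) (g : Int → Int) :
    ((l.map (fun p => if p.1 == c then (c, p.2 + k) else p)).map
        (fun p => p.2 * g p.1)).sum
      = (l.map (fun p => p.2 * g p.1)).sum + (if c ∈ l.map Prod.fst then k * g c else 0) := by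
  induction l with
  | nil => simp
  | cons q t ih =>
    rw [List.map_cons, List.nodup_cons] at hnd
    by_cases hq : q.1 = c
    · have hcnot : c ∉ t.map Prod.fst := hq ▸ hnd.1
      have ht : t.map (fun p => if p.1 == c then (c, p.2 + k) else p) = t := by
        conv_rhs => rw [← List.map_id t]
        apply List.map_congr_left
        intro p hp
        have hpc : p.1 ≠ c := fun h => hcnot (h ▸ List.mem_map_of_mem hp)
        simp [hpc]
      rw [List.map_cons, ht, List.map_cons, List.map_cons, List.sum_cons, List.sum_cons,
        if_pos (by simp [hq])]
      rw [if_pos (by simp [hq])]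
      simp only [hq]
      ring
    · have hih := ih hnd.2
      rw [List.map_cons, List.map_cons, List.map_cons, List.sum_cons,
        if_neg (by simp [hq]), List.map_cons, List.sum_cons, hih]
      have hmemiff : c ∈ q.1 :: t.map Prod.fst ↔ c ∈ t.map Prod.fst := by
        constructor
        · intro h
          rcases List.mem_cons.mp h with h | h
          · exact absurd h.symm hq
          · exact h
        · exact fun h => List.mem_cons_of_mem _ h
      by_cases hm : c ∈ t.map Prod.fst
      · rw [if_pos hm, if_pos (hmemiff.mpr hm)]; ring
      · rw [if_neg hm, if_neg (fun h => hm (hmemiff.mp h))]; ring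

-- 'new[c] = new.get(c, 0) + k' adds k * A(rest, c) to the weighted sum
theorem Wsum_insert_add (rest : List Int) (d : PySem.Dict Int Int) (hnd : d.keys.Nodup)
    (c k : Int) :
    Wsum rest (d.insert c (d.getD c 0 + k)) = Wsum rest d + k * use_or_lose rest c := by
  unfold Wsum
  by_cases hmem : d.contains c
  · rw [PySem.Dict.items_insert_of_contains _ _ hmem]
    have hgetD : ∀ p ∈ d.items, p.1 = c → p.2 = d.getD c 0 := by
      intro p hp hpc
      obtain ⟨pa, pb⟩ := p
      have hpc' : pa = c := hpc
      subst hpc'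
      exact ((PySem.Dict.getD_of_mem_items d hp hnd) 0).symm
    have hkeys : c ∈ d.items.map Prod.fst := by
      have h3 := PySem.Dict.contains_iff_mem_keys (d := d) (k := c)
      simp only [PySem.Dict.keys] at h3
      simpa using h3.mp hmem
    have hrepl : (d.items.map (fun p => if p.1 == c then (c, d.getD c 0 + k) else p))
        = d.items.map (fun p => if p.1 == c then (c, p.2 + k) else p) := by
      apply List.map_congr_left; intro p hp
      by_cases h : p.1 = c
      · simp [h, hgetD p hp h]
      · simp [h]
    rw [hrepl, sum_map_replace d.items hnd c k _, if_pos hkeys]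
  · rw [PySem.Dict.items_insert_of_not_contains _ _ (by simpa using hmem)]
    rw [PySem.Dict.getD_of_not_contains _ _ (by simpa using hmem)]
    simp [List.sum_append]

-- inner-loop invariant: folding entries l into accumulator (t, e)
theorem inner_invariant (s : Int) (rest : List Int) (l : List (Int × Int)) :
    ∀ (t : Int) (e : PySem.Dict Int Int), e.keys.Nodup → (∀ p ∈ e.items, p.1 ≠ 0) →
    (∀ p ∈ l, p.1 ≠ 0) →
    (l.foldl
      (fun acc p =>
        let c := p.1
        let k := p.2
        let new1 := acc.2.insert c (acc.2.getD c 0 + k)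
        if s ≤ c then
          if c - s = 0 then (acc.1 + k, new1)
          else (acc.1, new1.insert (c - s) (new1.getD (c - s) 0 + k))
        else (acc.1, new1)) (t, e)).2.keys.Nodup ∧
    (∀ p ∈ (l.foldl
      (fun acc p =>
        let c := p.1
        let k := p.2
        let new1 := acc.2.insert c (acc.2.getD c 0 + k)
        if s ≤ c then
          if c - s = 0 then (acc.1 + k, new1)
          else (acc.1, new1.insert (c - s) (new1.getD (c - s) 0 + k))
        else (acc.1, new1)) (t, e)).2.items, p.1 ≠ 0) ∧
    (l.foldl
      (fun acc p =>
        let c := p.1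
        let k := p.2
        let new1 := acc.2.insert c (acc.2.getD c 0 + k)
        if s ≤ c then
          if c - s = 0 then (acc.1 + k, new1)
          else (acc.1, new1.insert (c - s) (new1.getD (c - s) 0 + k))
        else (acc.1, new1)) (t, e)).1
      + Wsum rest (l.foldl
      (fun acc p =>
        let c := p.1
        let k := p.2
        let new1 := acc.2.insert c (acc.2.getD c 0 + k)
        if s ≤ c then
          if c - s = 0 then (acc.1 + k, new1)
          else (acc.1, new1.insert (c - s) (new1.getD (c - s) 0 + k))
        else (acc.1, new1)) (t, e)).2
        = t + Wsum rest e + (l.map (fun p => p.2 * use_or_lose (s :: rest) p.1)).sum := by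
  induction l with
  | nil =>
    intro t e hnd hnz _
    refine ⟨hnd, hnz, by simp⟩
  | cons q tl ih =>
    intro t e hnd hnz hl
    have hq0 : q.1 ≠ 0 := hl q (by simp)
    have htl : ∀ p ∈ tl, p.1 ≠ 0 := fun p hp => hl p (by simp [hp])
    have hnd1 : (e.insert q.1 (e.getD q.1 0 + q.2)).keys.Nodup :=
      PySem.Dict.nodup_keys_insert e _ _ hnd
    have hnz1 : ∀ p ∈ (e.insert q.1 (e.getD q.1 0 + q.2)).items, p.1 ≠ 0 := by
      intro p hp
      rcases (PySem.Dict.mem_items_insert _ _ _ _).mp hp with h | h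
      · rw [h]; exact hq0
      · exact hnz p h.1
    have hW1 : Wsum rest (e.insert q.1 (e.getD q.1 0 + q.2))
        = Wsum rest e + q.2 * use_or_lose rest q.1 := Wsum_insert_add rest e hnd q.1 q.2
    by_cases hs : s ≤ q.1
    · by_cases hz : q.1 - s = 0
      · have hstep := ih (t + q.2) (e.insert q.1 (e.getD q.1 0 + q.2)) hnd1 hnz1 htl
        simp only [List.foldl_cons, if_pos hs, if_pos hz]
        refine ⟨hstep.1, hstep.2.1, ?_⟩
        rw [hstep.2.2, hW1]
        have hA : use_or_lose (s :: rest) q.1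
            = use_or_lose rest (q.1 - s) + use_or_lose rest q.1 := by
          rw [use_or_lose_cons s q.1 rest hq0, if_neg (by omega)]
        rw [List.map_cons, List.sum_cons, hA, hz, use_or_lose_zero]
        ring
      · set d1 := e.insert q.1 (e.getD q.1 0 + q.2) with hd1
        have hnd2 : (d1.insert (q.1 - s) (d1.getD (q.1 - s) 0 + q.2)).keys.Nodup :=
          PySem.Dict.nodup_keys_insert d1 _ _ hnd1
        have hnz2 : ∀ p ∈ (d1.insert (q.1 - s) (d1.getD (q.1 - s) 0 + q.2)).items, p.1 ≠ 0 := by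
          intro p hp
          rcases (PySem.Dict.mem_items_insert _ _ _ _).mp hp with h | h
          · rw [h]; exact hz
          · exact hnz1 p h.1
        have hW2 : Wsum rest (d1.insert (q.1 - s) (d1.getD (q.1 - s) 0 + q.2))
            = Wsum rest d1 + q.2 * use_or_lose rest (q.1 - s) :=
          Wsum_insert_add rest d1 hnd1 (q.1 - s) q.2
        have hstep := ih t (d1.insert (q.1 - s) (d1.getD (q.1 - s) 0 + q.2)) hnd2 hnz2 htl
        simp only [List.foldl_cons, if_pos hs, if_neg hz]
        refine ⟨hstep.1, hstep.2.1, ?_⟩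
        rw [hstep.2.2, hW2, hW1]
        have hA : use_or_lose (s :: rest) q.1
            = use_or_lose rest (q.1 - s) + use_or_lose rest q.1 := by
          rw [use_or_lose_cons s q.1 rest hq0, if_neg (by omega)]
        rw [List.map_cons, List.sum_cons, hA]
        ring
    · have hstep := ih t (e.insert q.1 (e.getD q.1 0 + q.2)) hnd1 hnz1 htl
      simp only [List.foldl_cons, if_neg hs]
      refine ⟨hstep.1, hstep.2.1, ?_⟩
      rw [hstep.2.2, hW1]
      have hA : use_or_lose (s :: rest) q.1 = use_or_lose rest q.1 := by
        rw [use_or_lose_cons s q.1 rest hq0, if_pos (by omega)]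
      rw [List.map_cons, List.sum_cons, hA]
      ring

-- outer-loop invariant
theorem outer_invariant (sizes : List Int) :
    ∀ (t : Int) (d : PySem.Dict Int Int), d.keys.Nodup → (∀ p ∈ d.items, p.1 ≠ 0) →
    (sizes.foldl (fun st s => uolStep s st) (t, d)).1 = t + Wsum sizes d := by
  induction sizes with
  | nil =>
    intro t d _ hnz
    have hW : Wsum [] d = 0 := by
      unfold Wsum
      rw [List.sum_eq_zero]
      intro x hx
      rcases List.mem_map.mp hx with ⟨p, hp, hpx⟩
      rw [← hpx, use_or_lose_nil p.1 (hnz p hp)]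
      ring
    simp [hW]
  | cons s rest ih =>
    intro t d hnd hnz
    have hin := inner_invariant s rest d.items t PySem.Dict.empty
      (by simp [PySem.Dict.keys, PySem.Dict.empty]) (by simp [PySem.Dict.empty]) hnz
    have hstep : uolStep s (t, d) = d.items.foldl
      (fun acc p =>
        let c := p.1
        let k := p.2
        let new1 := acc.2.insert c (acc.2.getD c 0 + k)
        if s ≤ c then
          if c - s = 0 then (acc.1 + k, new1)
          else (acc.1, new1.insert (c - s) (new1.getD (c - s) 0 + k))
        else (acc.1, new1)) (t, PySem.Dict.empty) := rfl
    have hWempty : Wsum rest PySem.Dict.empty = 0 := by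
      simp [Wsum, PySem.Dict.empty]
    rw [List.foldl_cons, ih (uolStep s (t, d)).1 (uolStep s (t, d)).2
      (by rw [hstep]; exact hin.1) (by rw [hstep]; exact hin.2.1)]
    have hmain := hin.2.2
    rw [← hstep] at hmain
    rw [hmain, hWempty]
    unfold Wsum
    ring

-- ===== VERDICT (by name: the statement is the Claim_ definition above) =====
theorem use_or_lose_spec : Claim_equal_use_or_lose := by
  intro sizes capacity _
  unfold Spec_use_or_lose use_or_lose_alt
  by_cases hc : capacity = 0
  · simp [hc, use_or_lose_zero]
  · rw [if_neg hc]
    have hof : PySem.Dict.ofList [(capacity, (1 : Int))] = PySem.Dict.empty.insert capacity 1 := rfl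
    have hitems : (PySem.Dict.ofList [(capacity, (1 : Int))]).items = [(capacity, (1 : Int))] := by
      rw [hof, PySem.Dict.items_insert_of_not_contains _ _ (by simp [pysem])]
      simp [PySem.Dict.empty]
    have hnd : (PySem.Dict.ofList [(capacity, (1 : Int))]).keys.Nodup := by
      rw [hof]
      exact PySem.Dict.nodup_keys_insert _ _ _ PySem.Dict.nodup_keys_empty
    have hnz : ∀ p ∈ (PySem.Dict.ofList [(capacity, (1 : Int))]).items, p.1 ≠ 0 := by
      rw [hitems]
      intro p hp
      have : p = (capacity, 1) := by simpa using hp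
      rw [this]
      exact hc
    have hmain := outer_invariant sizes 0 (PySem.Dict.ofList [(capacity, (1 : Int))]) hnd hnz
    rw [hmain]
    unfold Wsum
    rw [hitems]
    simp
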